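-- pv_equiv track=rewrite | github.com/svinoczarITMO/s4-dsa-stepik | task2(tree height).py | get_longest_path_length
-- ===== SOURCE A (Python) =====
-- def get_longest_path_length(elements, current_index):
--     current_element = elements[current_index]
--     if len(current_element) == 0:
--         return 1
--     max_length = 1
--     for next_index in current_element:
--         count = get_longest_path_length(elements, next_index)
--         if count > max_length:
--             max_length = count
--     return 1 + max_length
-- ===== SOURCE B (Python) =====
-- def get_longest_path_length(elements, current_index):
--     # Memoized depth-first walk: each node's height is computed once and cached,
--     # so shared sub-DAGs are not re-explored.
--     memo = {}
--
--     def height(i):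
--         if i in memo:
--             return memo[i]
--         children = elements[i]
--         if len(children) == 0:
--             result = 1
--         else:
--             best = 1
--             for j in children:
--                 c = height(j)
--                 if c > best:
--                     best = c
--             result = 1 + best
--         memo[i] = result
--         return result
--
--     return height(current_index)
-- ===== Notes on version B (the rewrite author's own statement) =====
-- stated objective: faster
-- what changed: Replaces A's naive recursion (which re-explores shared sub-DAGs exponentially often) by a memoized depth-first walk that caches each node's height in a dict, computing every reachable node once.
import Mathlib
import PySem

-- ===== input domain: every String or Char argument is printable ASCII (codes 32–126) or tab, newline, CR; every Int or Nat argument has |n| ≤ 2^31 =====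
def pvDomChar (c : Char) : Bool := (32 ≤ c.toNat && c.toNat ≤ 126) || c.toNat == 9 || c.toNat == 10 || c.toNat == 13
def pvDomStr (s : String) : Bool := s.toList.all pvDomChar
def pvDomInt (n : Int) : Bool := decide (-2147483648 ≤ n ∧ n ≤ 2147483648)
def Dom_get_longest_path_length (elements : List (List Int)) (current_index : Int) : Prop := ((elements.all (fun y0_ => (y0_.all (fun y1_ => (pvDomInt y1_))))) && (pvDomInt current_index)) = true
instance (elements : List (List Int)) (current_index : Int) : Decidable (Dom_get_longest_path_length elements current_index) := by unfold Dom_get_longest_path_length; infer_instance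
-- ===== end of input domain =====

-- B caches each node's height in a dict (memoized DFS), so shared sub-DAGs are
-- explored once instead of being recursively re-explored by A.

-- ===== PORT A =====
-- fuel only makes the recursion total; under Pre_ the recursion depth is < fuel
def pvGoA (elements : List (List Int)) : Nat → Int → Int
  | 0, _ => 0
  | f + 1, i =>
    match PySem.List.pyGet? elements i with
    | none => 0   -- IndexError in Python; excluded by Pre_
    | some current_element =>
      if current_element.length = 0 then 1
      else 1 + current_element.foldl
        (fun max_length next_index =>
          if pvGoA elements f next_index > max_length then pvGoA elements f next_index
          else max_length) 1

def get_longest_path_length (elements : List (List Int)) (current_index : Int) : Int :=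
  pvGoA elements (elements.length + 1) current_index

-- ===== PORT B =====
-- the inner `height` of Source B, returning (value, updated memo); fuel only for totality
def pvHeightB (elements : List (List Int)) : Nat → PySem.Dict Int Int → Int → Int × PySem.Dict Int Int
  | 0, memo, _ => (0, memo)
  | f + 1, memo, i =>
    match memo.get? i with
    | some v => (v, memo)
    | none =>
      match PySem.List.pyGet? elements i with
      | none => (0, memo)   -- IndexError in Python; excluded by Pre_
      | some children =>
        let result :=
          if children.length = 0 then (1 : Int)
          else 1 + (children.foldl
            (fun (acc : Int × PySem.Dict Int Int) j =>
              let r := pvHeightB elements f acc.2 j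
              if r.1 > acc.1 then (r.1, r.2) else (acc.1, r.2)) (1, memo)).1
        let memo' :=
          if children.length = 0 then memo
          else (children.foldl
            (fun (acc : Int × PySem.Dict Int Int) j =>
              let r := pvHeightB elements f acc.2 j
              if r.1 > acc.1 then (r.1, r.2) else (acc.1, r.2)) (1, memo)).2
        (result, memo'.insert i result)

def get_longest_path_length_alt (elements : List (List Int)) (current_index : Int) : Int :=
  (pvHeightB elements (elements.length + 1) PySem.Dict.empty current_index).1

-- ===== PRECONDITION & SPEC =====
-- pvElim t i = "node i is eliminated within t rounds of Kahn-style removal": i is a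
-- valid (possibly negative, Python-style) index and all its children are eliminated
-- one round earlier.
def pvElim (elements : List (List Int)) : Nat → Int → Bool
  | 0, _ => false
  | t + 1, i =>
    match PySem.List.pyGet? elements i with
    | none => false
    | some children => children.all (pvElim elements t)

-- Pre_ = A returns normally: every index reachable from current_index is in range and
-- the reachable part of the children graph is acyclic (otherwise A raises IndexError /
-- RecursionError); equivalently the start node is eliminated within n+1 Kahn rounds.
def Pre_get_longest_path_length (elements : List (List Int)) (current_index : Int) : Prop :=
  pvElim elements (elements.length + 1) current_index = true

instance (elements : List (List Int)) (current_index : Int) : Decidable (Pre_get_longest_path_length elements current_index) := by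
  unfold Pre_get_longest_path_length; infer_instance

def pvWitness_get_longest_path_length : List (List Int) × Int := ([[], [0], [0, 1]], 2)

def Spec_get_longest_path_length (elements : List (List Int)) (current_index : Int) (out : Int) : Prop := out = get_longest_path_length_alt elements current_index
instance (elements : List (List Int)) (current_index : Int) (out : Int) : Decidable (Spec_get_longest_path_length elements current_index out) := by unfold Spec_get_longest_path_length; infer_instance

-- ===== CLAIM (what is proved, stated in full; the proofs are below) =====
def Claim_equal_get_longest_path_length : Prop := ∀ (elements : List (List Int)) (current_index : Int), Dom_get_longest_path_length elements current_index → Pre_get_longest_path_length elements current_index → Spec_get_longest_path_length elements current_index (get_longest_path_length elements current_index)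

-- ===== LEMMAS AND PROOFS =====

-- A's value at a node eliminated within t rounds does not depend on the fuel, once ≥ t
theorem pvGoA_fuel {elements : List (List Int)} :
    ∀ (t : Nat) (i : Int), pvElim elements t i = true →
      ∀ f f', t ≤ f → t ≤ f' → pvGoA elements f i = pvGoA elements f' i := by
  intro t
  induction t with
  | zero => intro i h; simp [pvElim] at h
  | succ t ih =>
    intro i h f f' hf hf'
    obtain ⟨f1, rfl⟩ : ∃ f1, f = f1 + 1 := ⟨f - 1, by omega⟩
    obtain ⟨f2, rfl⟩ : ∃ f2, f' = f2 + 1 := ⟨f' - 1, by omega⟩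
    simp only [pvElim] at h
    cases hg : PySem.List.pyGet? elements i with
    | none => rw [hg] at h; simp at h
    | some children =>
      rw [hg] at h
      simp only [List.all_eq_true] at h
      simp only [pvGoA, hg]
      split
      · rfl
      · congr 1
        apply PySem.List.foldl_congr_mem
        intro acc j hj
        rw [ih j (h j hj) f1 f2 (by omega) (by omega)]

-- canonical height of a node
def pvCval (elements : List (List Int)) (i : Int) : Int :=
  pvGoA elements (elements.length + 1) i

-- every memo entry records a canonical height
def pvInv (elements : List (List Int)) (memo : PySem.Dict Int Int) : Prop :=
  ∀ p ∈ memo.items, p.2 = pvCval elements p.1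

theorem pvInv_insert {elements : List (List Int)} {memo : PySem.Dict Int Int} {i v : Int}
    (hm : pvInv elements memo) (hv : v = pvCval elements i) :
    pvInv elements (memo.insert i v) := by
  intro p hp
  rcases (PySem.Dict.mem_items_insert _ _ _ _).1 hp with h | ⟨h, _⟩
  · rw [h]; exact hv
  · exact hm p h

-- the memoized walk returns the canonical height and preserves the memo invariant
theorem pvHeightB_correct {elements : List (List Int)} :
    ∀ (t : Nat), t ≤ elements.length + 1 →
      ∀ (i : Int), pvElim elements t i = true →
        ∀ (f : Nat), t ≤ f →
          ∀ (memo : PySem.Dict Int Int), pvInv elements memo →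
            (pvHeightB elements f memo i).1 = pvCval elements i ∧
            pvInv elements (pvHeightB elements f memo i).2 := by
  intro t
  induction t with
  | zero => intro _ i h; simp [pvElim] at h
  | succ t ih =>
    intro htn i h f hf memo hmemo
    obtain ⟨f1, rfl⟩ : ∃ f1, f = f1 + 1 := ⟨f - 1, by omega⟩
    simp only [pvElim] at h
    cases hg : PySem.List.pyGet? elements i with
    | none => rw [hg] at h; simp at h
    | some children =>
      rw [hg] at h
      simp only [List.all_eq_true] at h
      simp only [pvHeightB, hg]
      cases hget : memo.get? i with
      | some v =>
        refine ⟨?_, hmemo⟩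
        exact hmemo (i, v) (PySem.Dict.mem_items_of_get?_eq_some memo hget)
      | none =>
        -- the canonical value, unfolded one step with fuel elements.length
        have hcval0 : pvCval elements i
            = if children.length = 0 then 1
              else 1 + children.foldl
                (fun m j => if pvGoA elements elements.length j > m
                  then pvGoA elements elements.length j else m) 1 := by
          simp only [pvCval, pvGoA, hg]
        have hcval : pvCval elements i
            = if children.length = 0 then 1
              else 1 + children.foldl
                (fun m j => if pvCval elements j > m then pvCval elements j else m) 1 := by
          rw [hcval0]
          split
          · rfl
          · congr 1
            apply PySem.List.foldl_congr_mem
            intro acc j hj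
            rw [pvGoA_fuel t j (h j hj) elements.length (elements.length + 1)
              (by omega) (by omega)]
            simp only [pvCval]
        -- the threaded fold computes the max of canonical child heights and keeps pvInv
        have hfold : ∀ (ch : List Int), (∀ j ∈ ch, pvElim elements t j = true) →
            ∀ (b : Int) (m : PySem.Dict Int Int), pvInv elements m →
              (ch.foldl (fun (acc : Int × PySem.Dict Int Int) j =>
                  let r := pvHeightB elements f1 acc.2 j
                  if r.1 > acc.1 then (r.1, r.2) else (acc.1, r.2)) (b, m)).1
                = ch.foldl (fun m' j => if pvCval elements j > m' then pvCval elements j else m') b ∧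
              pvInv elements
                (ch.foldl (fun (acc : Int × PySem.Dict Int Int) j =>
                  let r := pvHeightB elements f1 acc.2 j
                  if r.1 > acc.1 then (r.1, r.2) else (acc.1, r.2)) (b, m)).2 := by
          intro ch
          induction ch with
          | nil => intro _ b m hm; exact ⟨rfl, hm⟩
          | cons c cs ihc =>
            intro hch b m hm
            obtain ⟨hc1, hc2⟩ := ih (by omega) c (hch c (by simp)) f1 (by omega) m hm
            simp only [List.foldl_cons]
            have hstep : (let r := pvHeightB elements f1 m c
                  if r.1 > b then (r.1, r.2) else (b, r.2))
                = (if pvCval elements c > b then pvCval elements c else b,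
                   (pvHeightB elements f1 m c).2) := by
              simp only [hc1]
              split <;> rfl
            rw [hstep]
            exact ihc (fun j hj => hch j (by simp [hj]))
              (if pvCval elements c > b then pvCval elements c else b)
              (pvHeightB elements f1 m c).2 hc2
        by_cases hemp : children.length = 0
        · simp only [hemp, if_true]
          refine ⟨by rw [hcval]; simp [hemp], ?_⟩
          exact pvInv_insert hmemo (by rw [hcval]; simp [hemp])
        · obtain ⟨hv, hi⟩ := hfold children h 1 memo hmemo
          simp only [if_neg hemp]
          constructor
          · rw [hcval, if_neg hemp, hv]
          · exact pvInv_insert hi (by rw [hcval, if_neg hemp, hv])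

theorem pvInv_empty (elements : List (List Int)) : pvInv elements PySem.Dict.empty := by
  intro p hp
  simp [PySem.Dict.empty] at hp

-- ===== VERDICT (by name: the statement is the Claim_ definition above) =====
theorem get_longest_path_length_spec : Claim_equal_get_longest_path_length := by
  intro elements i _ hPre
  unfold Spec_get_longest_path_length get_longest_path_length get_longest_path_length_alt
  have := pvHeightB_correct (elements := elements) (elements.length + 1) (by omega) i hPre
    (elements.length + 1) (by omega) PySem.Dict.empty (pvInv_empty elements)
  rw [this.1]
  rfl
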